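-- pv_equiv track=rewrite | github.com/Wizmann/ACM-ICPC | Leetcode/Algorithm/python/Expressive Words.py | check
-- ===== SOURCE A (Python) =====
-- def check(S, word):
--     n, m = len(S), len(word)
--     p, q = 0, 0
--     while p < n and q < m:
--         if S[p] != word[q]:
--             return False
--         c1, c2 = 0, 0
--         cp, cq = S[p], word[q]
--         while p < n and S[p] == cp:
--             c1 += 1
--             p += 1
--
--         while q < m and word[q] == cq:
--             c2 += 1
--             q += 1
--
--         if c1 == c2:
--             continue
--         elif c1 > c2 and c1 >= 3:
--             continue
--         else:
--             return False
--
--     return p == n and q == m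
-- ===== SOURCE B (Python) =====
-- def check(S, word):
--     def rle(s):
--         groups = []
--         for c in s:
--             if groups and groups[-1][0] == c:
--                 groups[-1] = (c, groups[-1][1] + 1)
--             else:
--                 groups.append((c, 1))
--         return groups
--     gs, gw = rle(S), rle(word)
--     if len(gs) != len(gw):
--         return False
--     return all(c1 == c2 and (n1 == n2 or (n1 > n2 and n1 >= 3))
--                for (c1, n1), (c2, n2) in zip(gs, gw))
-- ===== Notes on version B (the rewrite author's own statement) =====
-- stated objective: simpler
-- what changed: Replaces A's interleaved two-pointer scan with inner run-counting while-loops by building the run-length encodings of both strings up front and then comparing the two group lists pairwise with a single zip/all pass.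
import Mathlib
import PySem

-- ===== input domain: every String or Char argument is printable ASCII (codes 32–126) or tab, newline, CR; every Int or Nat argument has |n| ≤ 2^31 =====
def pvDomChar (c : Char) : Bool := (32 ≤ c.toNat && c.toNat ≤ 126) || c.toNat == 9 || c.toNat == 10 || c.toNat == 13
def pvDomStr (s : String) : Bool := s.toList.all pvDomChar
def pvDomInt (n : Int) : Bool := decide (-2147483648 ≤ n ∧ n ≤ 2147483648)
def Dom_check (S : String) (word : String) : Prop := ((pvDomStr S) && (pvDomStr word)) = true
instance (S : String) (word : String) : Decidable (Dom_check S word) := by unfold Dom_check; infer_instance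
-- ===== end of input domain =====

-- B replaces A's two-pointer scan with inner run-counting loops by building both
-- run-length encodings up front and comparing them with one zip/all pass (objective: simpler).

-- ===== PORT A =====
-- A's inner 'while S[p] == cp: c1 += 1; p += 1' loop: counts the leading run of c and
-- returns the rest of the list (the fst is the count gathered PAST the first char).
def runCount (c : Char) : List Char → Nat × List Char
  | [] => (0, [])
  | x :: xs => if x = c then ((runCount c xs).1 + 1, (runCount c xs).2) else (0, x :: xs)

theorem runCount_len (c : Char) (s : List Char) : (runCount c s).2.length ≤ s.length := by
  induction s with
  | nil => simp [runCount]
  | cons x xs ih =>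
    by_cases h : x = c
    · simp [runCount, h]; omega
    · simp [runCount, h]

-- A's outer while loop; the final 'return p == n and q == m'.
def checkAux : List Char → List Char → Bool
  | [], w => w.isEmpty
  | _ :: _, [] => false
  | a :: s, b :: w =>
    if a ≠ b then false
    else
      let c1 := (runCount a s).1 + 1
      let c2 := (runCount b w).1 + 1
      if c1 = c2 then checkAux (runCount a s).2 (runCount b w).2
      else if c2 < c1 ∧ 3 ≤ c1 then checkAux (runCount a s).2 (runCount b w).2
      else false
termination_by s _ => s.length
decreasing_by all_goals exact Nat.lt_succ_of_le (runCount_len _ _)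

def check (S : String) (word : String) : Bool := checkAux S.toList word.toList

-- ===== PORT B =====
-- Source B's rle loop body: extend the last group or append a fresh one
-- (accumulator kept reversed, reversed once at the end — the usual port of append-to-list loops).
def rleStep (acc : List (Char × Nat)) (c : Char) : List (Char × Nat) :=
  match acc with
  | (c', n) :: rest => if c' = c then (c, n + 1) :: rest else (c, 1) :: (c', n) :: rest
  | [] => [(c, 1)]

def rle (s : List Char) : List (Char × Nat) := (s.foldl rleStep []).reverse

-- Source B's per-pair condition: c1 == c2 and (n1 == n2 or (n1 > n2 and n1 >= 3))
def grpOk (p : (Char × Nat) × (Char × Nat)) : Bool :=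
  (p.1.1 == p.2.1) && ((p.1.2 == p.2.2) || (decide (p.2.2 < p.1.2) && decide (3 ≤ p.1.2)))

def chk (gs gw : List (Char × Nat)) : Bool :=
  if gs.length ≠ gw.length then false else (gs.zip gw).all grpOk

def check_alt (S : String) (word : String) : Bool :=
  chk (rle S.toList) (rle word.toList)

-- ===== PRECONDITION & SPEC =====
def Spec_check (S : String) (word : String) (out : Bool) : Prop := out = check_alt S word
instance (S : String) (word : String) (out : Bool) : Decidable (Spec_check S word out) := by unfold Spec_check; infer_instance

-- ===== CLAIM (what is proved, stated in full; the proofs are below) =====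
def Claim_equal_check : Prop := ∀ (S : String) (word : String), Dom_check S word → Spec_check S word (check S word)

-- ===== LEMMAS AND PROOFS =====

-- recursive characterisation of the run-length encoding
def rleR : List Char → List (Char × Nat)
  | [] => []
  | a :: s => (a, (runCount a s).1 + 1) :: rleR (runCount a s).2
termination_by s => s.length
decreasing_by exact Nat.lt_succ_of_le (runCount_len _ _)

theorem runCount_head (c : Char) (s : List Char) :
    ∀ x ∈ (runCount c s).2.head?, x ≠ c := by
  induction s with
  | nil => simp [runCount]
  | cons x xs ih =>
    by_cases h : x = c
    · simpa [runCount, h] using ih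
    · simp [runCount, h]

theorem foldl_rleStep_run (s : List Char) (a : Char) (n : Nat) (acc : List (Char × Nat)) :
    List.foldl rleStep ((a, n) :: acc) s
      = List.foldl rleStep ((a, n + (runCount a s).1) :: acc) (runCount a s).2 := by
  induction s generalizing n with
  | nil => simp [runCount]
  | cons x xs ih =>
    by_cases h : x = a
    · subst h
      simp only [List.foldl_cons]
      rw [show rleStep ((x, n) :: acc) x = (x, n + 1) :: acc from by simp [rleStep],
        ih (n + 1), show runCount x (x :: xs) = ((runCount x xs).1 + 1, (runCount x xs).2)
          from by simp [runCount]]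
      ring_nf
    · simp [runCount, h]

theorem foldl_rleStep_eq (s : List Char) (acc : List (Char × Nat))
    (hacc : ∀ a n rest, acc = (a, n) :: rest → ∀ x ∈ s.head?, x ≠ a) :
    List.foldl rleStep acc s = (rleR s).reverse ++ acc := by
  induction hn : s.length using Nat.strong_induction_on generalizing s acc with
  | _ k ih =>
  match s with
  | [] => simp [rleR]
  | a :: xs =>
    have hstep : rleStep acc a = (a, 1) :: acc := by
      match acc with
      | [] => simp [rleStep]
      | (c', m) :: rest =>
        have hne : a ≠ c' := hacc c' m rest rfl a (by simp)
        simp [rleStep, hne.symm]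
    simp only [List.foldl_cons, hstep]
    rw [foldl_rleStep_run]
    have hlen : (runCount a xs).2.length < k := by
      subst hn; exact Nat.lt_succ_of_le (runCount_len _ _)
    have hside : ∀ a' n' rest', ((a, 1 + (runCount a xs).1) :: acc) = (a', n') :: rest' →
        ∀ x ∈ (runCount a xs).2.head?, x ≠ a' := by
      intro a' n' rest' heq x hx
      obtain ⟨h1, -⟩ := List.cons.inj heq
      obtain ⟨rfl, -⟩ := Prod.mk.inj h1
      exact runCount_head a xs x hx
    rw [ih _ hlen _ _ hside rfl]
    simp [rleR, Nat.add_comm]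

theorem rle_eq_rleR (s : List Char) : rle s = rleR s := by
  rw [rle, foldl_rleStep_eq s [] (by intro a n rest h; cases h)]
  simp

theorem chk_cons (p q : Char × Nat) (gs gw : List (Char × Nat)) :
    chk (p :: gs) (q :: gw) = (grpOk (p, q) && chk gs gw) := by
  by_cases hl : gs.length = gw.length
  · simp [chk, hl]
  · simp [chk, hl]

theorem checkAux_eq_chk (s w : List Char) : checkAux s w = chk (rleR s) (rleR w) := by
  induction hn : s.length using Nat.strong_induction_on generalizing s w with
  | _ k ih =>
  match s, w with
  | [], [] => simp [checkAux, rleR, chk]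
  | [], b :: w => simp [checkAux, rleR, chk]
  | a :: s, [] => simp [checkAux, rleR, chk]
  | a :: s, b :: w =>
    have hlen : (runCount a s).2.length < k := by
      subst hn; exact Nat.lt_succ_of_le (runCount_len _ _)
    rw [checkAux, rleR, rleR, chk_cons]
    by_cases hab : a = b
    · subst hab
      simp only [ne_eq, not_true_eq_false, if_false]
      have hrec := ih _ hlen (runCount a s).2 (runCount a w).2 rfl
      by_cases h1 : (runCount a s).1 + 1 = (runCount a w).1 + 1
      · rw [if_pos h1, hrec]
        simp [grpOk, h1]
      · rw [if_neg h1]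
        by_cases h2 : (runCount a w).1 + 1 < (runCount a s).1 + 1 ∧ 3 ≤ (runCount a s).1 + 1
        · rw [if_pos h2, hrec]
          simp [grpOk, h2.1, h2.2]
        · rw [if_neg h2]
          have : grpOk ((a, (runCount a s).1 + 1), (a, (runCount a w).1 + 1)) = false := by
            simp [grpOk]
            omega
          simp [this]
    · have : grpOk ((a, (runCount a s).1 + 1), (b, (runCount b w).1 + 1)) = false := by
        simp [grpOk]
        exact fun h => absurd h hab
      simp [hab, this]

-- ===== VERDICT (by name: the statement is the Claim_ definition above) =====
theorem check_spec : Claim_equal_check := by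
  intro S word _
  unfold Spec_check check check_alt
  rw [rle_eq_rleR, rle_eq_rleR, checkAux_eq_chk]
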